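-- pv_equiv track=rewrite | github.com/TBNRnooch/dupeNumbers | solution1.py | function
-- ===== SOURCE A (Python) =====
-- def function(numbers):
--     res = 0
--     for i, n in enumerate(numbers):
--         for m in numbers[i+1:]:
--             if m == n:
--                 res = n
--                 break
--
--     return res
-- ===== SOURCE B (Python) =====
-- def function(numbers):
--     seen = set()
--     for n in reversed(numbers):
--         if n in seen:
--             return n
--         seen.add(n)
--     return 0
-- ===== Notes on version B (the rewrite author's own statement) =====
-- stated objective: faster
-- what changed: Replaced the nested left-to-right scan over all tails with a single right-to-left pass keeping a set of already-seen values and returning on the first hit.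
import Mathlib
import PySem

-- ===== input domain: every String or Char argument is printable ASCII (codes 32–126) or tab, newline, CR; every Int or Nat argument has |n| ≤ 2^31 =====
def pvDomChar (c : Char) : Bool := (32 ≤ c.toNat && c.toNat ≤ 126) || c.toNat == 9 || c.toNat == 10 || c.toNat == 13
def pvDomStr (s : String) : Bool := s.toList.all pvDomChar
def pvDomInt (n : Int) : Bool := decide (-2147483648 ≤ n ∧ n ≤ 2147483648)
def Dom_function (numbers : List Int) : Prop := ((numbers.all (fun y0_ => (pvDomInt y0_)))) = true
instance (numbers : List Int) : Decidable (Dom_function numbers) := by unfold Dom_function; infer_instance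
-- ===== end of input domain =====

-- B replaces A's quadratic nested scan by one right-to-left pass with a set and an early exit (faster).

-- ===== PORT A =====
-- inner 'for m in numbers[i+1:]: if m == n: res = n; break'
def innerA (n res : Int) : List Int → Int
  | [] => res
  | m :: ms => if m == n then n else innerA n res ms

def function (numbers : List Int) : Int :=
  (PySem.List.enumerate numbers).foldl
    (fun res p => innerA p.2 res (PySem.List.slice numbers (some (p.1 + 1)) none)) 0

-- ===== PORT B =====
-- 'for n in reversed(numbers): if n in seen: return n; seen.add(n)' then 'return 0'
def altGo (seen : PySem.Set Int) : List Int → Int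
  | [] => 0
  | n :: rest => if PySem.Set.contains seen n then n else altGo (PySem.Set.add seen n) rest

def function_alt (numbers : List Int) : Int := altGo PySem.Set.empty numbers.reverse

-- ===== PRECONDITION & SPEC =====
def Spec_function (numbers : List Int) (out : Int) : Prop := out = function_alt numbers
instance (numbers : List Int) (out : Int) : Decidable (Spec_function numbers out) := by unfold Spec_function; infer_instance

-- ===== CLAIM (what is proved, stated in full; the proofs are below) =====
def Claim_equal_function : Prop := ∀ (numbers : List Int), Dom_function numbers → Spec_function numbers (function numbers)

-- ===== LEMMAS AND PROOFS =====

theorem innerA_eq (n res : Int) : ∀ (xs : List Int), innerA n res xs = if n ∈ xs then n else res := by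
  intro xs
  induction xs with
  | nil => simp [innerA]
  | cons m ms ih =>
      by_cases h : m = n
      · simp [innerA, h]
      · simp [innerA, h, ih, Ne.symm h]

-- A's accumulator view: one structural pass over the list's tails
def aLoop (res : Int) : List Int → Int
  | [] => res
  | n :: t => aLoop (if n ∈ t then n else res) t

theorem foldA (t : List Int) : ∀ (pre : List Int) (res : Int),
    (PySem.List.enumerate t (pre.length : Int)).foldl
      (fun res p => innerA p.2 res (PySem.List.slice (pre ++ t) (some (p.1 + 1)) none)) res
    = aLoop res t := by
  induction t with
  | nil => intro pre res; simp [PySem.List.enumerate_nil, aLoop]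
  | cons n t' ih =>
      intro pre res
      rw [PySem.List.enumerate_cons]
      simp only [List.foldl_cons]
      have hc : ((pre.length : Int) + 1) = ((pre.length + 1 : Nat) : Int) := by push_cast; ring
      have hs : PySem.List.slice (pre ++ n :: t') (some ((pre.length : Int) + 1)) none = t' := by
        rw [hc, PySem.List.slice_from_natCast]
        have : pre ++ n :: t' = (pre ++ [n]) ++ t' := by simp
        rw [this]
        have hlen : (pre ++ [n]).length = pre.length + 1 := by simp
        rw [← hlen, List.drop_left]
      rw [hs, innerA_eq]
      have h2 : pre ++ n :: t' = (pre ++ [n]) ++ t' := by simp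
      have h3 := ih (pre ++ [n]) (if n ∈ t' then n else res)
      simp only [List.length_append, List.length_cons, List.length_nil] at h3
      rw [h2, hc]
      simpa using h3
      
theorem function_eq_aLoop (numbers : List Int) : function numbers = aLoop 0 numbers := by
  have := foldA numbers [] 0
  simpa [function] using this

-- B's optional view: found value, or none
def bOpt (seen : PySem.Set Int) : List Int → Option Int
  | [] => none
  | n :: rest => if PySem.Set.contains seen n then some n else bOpt (PySem.Set.add seen n) rest

theorem altGo_eq_bOpt (xs : List Int) : ∀ (seen : PySem.Set Int),
    altGo seen xs = (bOpt seen xs).getD 0 := by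
  induction xs with
  | nil => intro seen; simp [altGo, bOpt]
  | cons n rest ih =>
      intro seen
      by_cases h : n ∈ seen
      · simp [altGo, bOpt, h]
      · simp [altGo, bOpt, h, ih]

theorem bOpt_append (l : List Int) : ∀ (r : List Int) (seen : PySem.Set Int),
    bOpt seen (l ++ r) = (bOpt seen l).or (bOpt (l.foldl PySem.Set.add seen) r) := by
  induction l with
  | nil => intro r seen; simp [bOpt]
  | cons n l' ih =>
      intro r seen
      by_cases h : n ∈ seen
      · simp [bOpt, h]
      · simp [bOpt, h, ih]

theorem mem_foldl_add' (l : List Int) (seen : PySem.Set Int) (y : Int) :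
    y ∈ l.foldl PySem.Set.add seen ↔ y ∈ seen ∨ y ∈ l := by
  have h := PySem.Set.mem_foldl_add (l := l) (s := seen) (f := fun x => x) (y := y)
  simpa using h

theorem aLoop_eq_bOpt (t : List Int) : ∀ (res : Int),
    aLoop res t = (bOpt PySem.Set.empty t.reverse).getD res := by
  induction t with
  | nil => intro res; simp [aLoop, bOpt]
  | cons n t' ih =>
      intro res
      have hrev : (n :: t').reverse = t'.reverse ++ [n] := by simp
      rw [aLoop, ih, hrev, bOpt_append]
      set S := t'.reverse.foldl PySem.Set.add PySem.Set.empty with hS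
      have hmem : n ∈ S ↔ n ∈ t' := by
        rw [hS, mem_foldl_add']
        simp [PySem.Set.empty]
      cases hfind : bOpt PySem.Set.empty t'.reverse with
      | some x => simp
      | none =>
          by_cases h : n ∈ t'
          · simp [bOpt, hmem, h]
          · simp [bOpt, hmem, h]

-- ===== VERDICT (by name: the statement is the Claim_ definition above) =====
theorem function_spec : Claim_equal_function := by
  intro numbers _
  unfold Spec_function function_alt
  rw [function_eq_aLoop, aLoop_eq_bOpt, altGo_eq_bOpt]
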